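-- pv_equiv track=rewrite | github.com/MrBrantCode/unitest_baseline | mut_generate/mist_train_cf/cf_81829/solution.py | happy_possible
-- ===== SOURCE A (Python) =====
-- def happy_possible(s, r):
--     if len(set(s)) < 3:
--         return False
--     for i in range(len(s)):
--         if s[i:i+3] == s[i:i+3][::-1]:
--             if i > 0 and s[i-1:i+2] != s[i:i+3] and s[:i].count(s[i])==1 and s[i+1:].count(s[i])==1 and s[:i].count(r)==0 and s[i+1:].count(r)==0:
--                 return True
--             else:
--                 continue
--             return False
--         else:
--             continue
--     return False
-- ===== SOURCE B (Python) =====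
-- def happy_possible(s, r):
--     if len(set(s)) < 3:
--         return False
--     # total occurrences of each character, computed once
--     total = {}
--     for c in s:
--         total[c] = total.get(c, 0) + 1
--     # first/last occurrence data of the substring r in s, computed once:
--     # occ_end = end index of the earliest occurrence, occ_last = start of the latest
--     occ_end = None
--     occ_last = None
--     for p in range(len(s) + 1):
--         if s.startswith(r, p):
--             if occ_end is None:
--                 occ_end = p + len(r)
--             occ_last = p
--     # single pass with a running prefix counter
--     pref = {}
--     for i in range(len(s)):
--         c = s[i]
--         if (s[i:i+3] == s[i:i+3][::-1]
--                 and i > 0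
--                 and s[i-1:i+2] != s[i:i+3]
--                 and total.get(c, 0) == 3 and pref.get(c, 0) == 1
--                 and (occ_end is None or occ_end > i)
--                 and (occ_last is None or occ_last < i + 1)):
--             return True
--         pref[c] = pref.get(c, 0) + 1
--     return False
-- ===== Notes on version B (the rewrite author's own statement) =====
-- stated objective: faster
-- what changed: A re-counts s[:i].count(...)/s[i+1:].count(...) from scratch at every index; B precomputes total character counts and the first/last occurrence of r once, then decides every index in O(1) with a running prefix counter.
import Mathlib
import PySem

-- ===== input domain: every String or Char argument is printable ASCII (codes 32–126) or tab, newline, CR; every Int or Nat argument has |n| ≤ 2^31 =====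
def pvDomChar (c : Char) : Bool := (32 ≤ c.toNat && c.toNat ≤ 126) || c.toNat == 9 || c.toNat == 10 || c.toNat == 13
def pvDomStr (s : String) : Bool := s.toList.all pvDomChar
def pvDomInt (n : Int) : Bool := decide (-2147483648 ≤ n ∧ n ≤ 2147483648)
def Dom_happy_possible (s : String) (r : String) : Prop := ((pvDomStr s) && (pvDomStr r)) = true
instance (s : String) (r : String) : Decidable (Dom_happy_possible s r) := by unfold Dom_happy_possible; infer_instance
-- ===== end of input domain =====

-- B replaces A's per-index substring counting by one total character count, one first/last
-- occurrence scan for r, and a running prefix counter in a single pass (objective: faster).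

-- ===== PORT A =====
-- the 'for i in range(len(s))' loop of A; returns True on the first index passing the test.
-- i is drawn from range(len(s)), so s[i] never raises and pyGetD's default is unreachable;
-- s[i:i+3][::-1] has step -1 which never raises, so .getD [] on slice? is exact.
def happyLoopA (cs rl : List Char) : List Int → Bool
  | [] => false
  | i :: rest =>
    if PySem.List.slice cs (some i) (some (i + 3)) ==
        (PySem.List.slice? (PySem.List.slice cs (some i) (some (i + 3))) none none (-1)).getD [] then
      if decide (0 < i) &&
         !(PySem.List.slice cs (some (i - 1)) (some (i + 2)) ==
           PySem.List.slice cs (some i) (some (i + 3))) &&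
         (PySem.Chars.count (PySem.List.slice cs none (some i)) [PySem.List.pyGetD cs i ' '] == 1) &&
         (PySem.Chars.count (PySem.List.slice cs (some (i + 1)) none) [PySem.List.pyGetD cs i ' '] == 1) &&
         (PySem.Chars.count (PySem.List.slice cs none (some i)) rl == 0) &&
         (PySem.Chars.count (PySem.List.slice cs (some (i + 1)) none) rl == 0) then
        true
      else
        happyLoopA cs rl rest
    else
      happyLoopA cs rl rest

def happy_possible (s : String) (r : String) : Bool :=
  if (PySem.Set.ofList s.toList).length < 3 then false
  else happyLoopA s.toList r.toList (PySem.List.pyRange 0 s.toList.length)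

-- ===== PORT B =====
-- total character counts of s, computed once (the 'total' dict of Source B)
def altTotal (cs : List Char) : PySem.Dict Char Int :=
  cs.foldl (fun d c => d.insert c (d.getD c 0 + 1)) PySem.Dict.empty

-- the occurrence scan of Source B: occ_end = end of the earliest occurrence of r, occ_last =
-- start of the latest; s.startswith(r, p) with 0 ≤ p ≤ len(s) is exactly: r is a prefix of s[p:]
def altOccScan (cs rl : List Char) : List Int → Option Int × Option Int → Option Int × Option Int
  | [], st => st
  | p :: rest, st =>
    if PySem.Chars.startswith (List.drop p.toNat cs) rl then
      altOccScan cs rl rest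
        ((match st.1 with
          | none => some (p + rl.length)
          | some e => some e), some p)
    else altOccScan cs rl rest st

-- the single pass of Source B with the running prefix-counter dict
-- (i is drawn from range(len(s)), so s[i] never raises; pyGetD's default is unreachable)
def altLoop (cs rl : List Char) (total : PySem.Dict Char Int) (occEnd occLast : Option Int) :
    List Int → PySem.Dict Char Int → Bool
  | [], _ => false
  | i :: rest, pref =>
    if (PySem.List.slice cs (some i) (some (i + 3)) ==
         (PySem.List.slice? (PySem.List.slice cs (some i) (some (i + 3))) none none (-1)).getD []) &&
       decide (0 < i) &&
       !(PySem.List.slice cs (some (i - 1)) (some (i + 2)) ==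
         PySem.List.slice cs (some i) (some (i + 3))) &&
       (total.getD (PySem.List.pyGetD cs i ' ') 0 == 3) &&
       (pref.getD (PySem.List.pyGetD cs i ' ') 0 == 1) &&
       (match occEnd with | none => true | some e => decide (i < e)) &&
       (match occLast with | none => true | some l => decide (l < i + 1)) then
      true
    else
      altLoop cs rl total occEnd occLast rest
        (pref.insert (PySem.List.pyGetD cs i ' ')
          (pref.getD (PySem.List.pyGetD cs i ' ') 0 + 1))

def happy_possible_alt (s : String) (r : String) : Bool :=
  if (PySem.Set.ofList s.toList).length < 3 then false
  else
    altLoop s.toList r.toList (altTotal s.toList)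
      (altOccScan s.toList r.toList (PySem.List.pyRange 0 (s.toList.length + 1)) (none, none)).1
      (altOccScan s.toList r.toList (PySem.List.pyRange 0 (s.toList.length + 1)) (none, none)).2
      (PySem.List.pyRange 0 s.toList.length) PySem.Dict.empty

-- ===== PRECONDITION & SPEC =====
def Spec_happy_possible (s : String) (r : String) (out : Bool) : Prop := out = happy_possible_alt s r
instance (s : String) (r : String) (out : Bool) : Decidable (Spec_happy_possible s r out) := by unfold Spec_happy_possible; infer_instance

-- ===== CLAIM (what is proved, stated in full; the proofs are below) =====
def Claim_equal_happy_possible : Prop := ∀ (s : String) (r : String), Dom_happy_possible s r → Spec_happy_possible s r (happy_possible s r)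

-- ===== LEMMAS AND PROOFS =====

-- unfolding equations for PySem.Chars.count.go
theorem countGo_nil (sub : List Char) (fuel acc : Nat) :
    PySem.Chars.count.go sub fuel [] acc = acc := by
  cases fuel <;> simp [PySem.Chars.count.go]

theorem countGo_cons (sub : List Char) (f : Nat) (h : Char) (t : List Char) (acc : Nat) :
    PySem.Chars.count.go sub (f + 1) (h :: t) acc =
      (if sub.isPrefixOf (h :: t) then
        PySem.Chars.count.go sub f (List.drop sub.length (h :: t)) (acc + 1)
       else PySem.Chars.count.go sub f t acc) := by
  simp [PySem.Chars.count.go]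

-- the accumulator of count.go only grows
theorem countGo_mono (sub : List Char) : ∀ (fuel : Nat) (l : List Char) (acc : Nat),
    acc ≤ PySem.Chars.count.go sub fuel l acc := by
  intro fuel
  induction fuel with
  | zero => intro l acc; cases l <;> simp [PySem.Chars.count.go]
  | succ f ih =>
    intro l acc
    cases l with
    | nil => simp [countGo_nil]
    | cons h t =>
      rw [countGo_cons]
      split
      · exact le_trans (Nat.le_succ acc) (ih _ _)
      · exact ih _ _

theorem countGo_single (c : Char) : ∀ (l : List Char) (fuel acc : Nat), l.length ≤ fuel →
    PySem.Chars.count.go [c] fuel l acc = acc + l.count c := by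
  intro l
  induction l with
  | nil => intro fuel acc _; simp [countGo_nil]
  | cons h t ih =>
    intro fuel acc hf
    cases fuel with
    | zero => simp at hf
    | succ f =>
      have hf' : t.length ≤ f := by simpa using hf
      rw [countGo_cons]
      by_cases hc : c = h
      · subst hc
        have hp : [c].isPrefixOf (c :: t) = true :=
          List.isPrefixOf_iff_prefix.mpr ⟨t, rfl⟩
        rw [if_pos hp]
        simp only [List.length_cons, List.length_nil, Nat.zero_add, List.drop_one, List.tail_cons]
        rw [ih f (acc + 1) hf']
        simp
        omega
      · have hp : [c].isPrefixOf (h :: t) = false := by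
          apply Bool.eq_false_iff.mpr
          intro hb
          rcases List.isPrefixOf_iff_prefix.mp hb with ⟨u, hu⟩
          simp at hu
          exact hc hu.1
        rw [if_neg (by simp [hp])]
        rw [ih f acc hf']
        have hcnt : (h :: t).count c = t.count c := by
          simp [Ne.symm hc]
        omega

-- counting a single-character needle is List.count
theorem count_single (cs : List Char) (c : Char) :
    PySem.Chars.count cs [c] = cs.count c := by
  have h := countGo_single c cs cs.length 0 le_rfl
  simpa [PySem.Chars.count] using h

theorem countGo_eq_acc_iff (sub : List Char) (hsub : sub ≠ []) :
    ∀ (fuel : Nat) (l : List Char) (acc : Nat), l.length ≤ fuel →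
      (PySem.Chars.count.go sub fuel l acc = acc ↔ ¬ sub <:+: l) := by
  intro fuel
  induction fuel with
  | zero =>
    intro l acc hf
    have hl : l = [] := List.length_eq_zero_iff.mp (Nat.le_zero.mp hf)
    subst hl
    simp [countGo_nil, List.infix_nil, hsub]
  | succ f ih =>
    intro l acc hf
    cases l with
    | nil => simp [countGo_nil, List.infix_nil, hsub]
    | cons h t =>
      have hf' : t.length ≤ f := by simpa using hf
      rw [countGo_cons]
      by_cases hp : sub <+: (h :: t)
      · rw [if_pos (List.isPrefixOf_iff_prefix.mpr hp)]
        constructor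
        · intro heq
          have := countGo_mono sub f (List.drop sub.length (h :: t)) (acc + 1)
          omega
        · intro hninf
          exact absurd hp.isInfix hninf
      · have hb : sub.isPrefixOf (h :: t) = false := by
          apply Bool.eq_false_iff.mpr
          intro hbt
          exact hp (List.isPrefixOf_iff_prefix.mp hbt)
        rw [if_neg (by simp [hb])]
        rw [ih t acc hf']
        simp [List.infix_cons_iff, hp]

-- a substring count is 0 exactly when the needle does not occur (nonempty needle)
theorem count_eq_zero_iff (cs sub : List Char) (hsub : sub ≠ []) :
    (PySem.Chars.count cs sub = 0 ↔ ¬ sub <:+: cs) := by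
  have h := countGo_eq_acc_iff sub hsub cs.length cs 0 le_rfl
  simpa [PySem.Chars.count, hsub] using h

-- Python count of the empty needle is length + 1 (never 0)
theorem count_nil (cs : List Char) : PySem.Chars.count cs [] = cs.length + 1 := by
  simp [PySem.Chars.count]

-- infix = prefix of some drop
theorem infix_iff_drop {α : Type} (sub l : List α) : sub <:+: l ↔ ∃ p, sub <+: l.drop p := by
  constructor
  · rintro ⟨pre, post, rfl⟩
    exact ⟨pre.length, by simpa [List.drop_left] using ⟨post, rfl⟩⟩
  · rintro ⟨p, hp⟩
    exact List.infix_iff_prefix_suffix.2 ⟨l.drop p, hp, List.drop_suffix p l⟩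

-- occurrence positions of rl in cs (proof-side only)
def hits (cs rl : List Char) : List Nat :=
  (List.range (cs.length + 1)).filter (fun p => PySem.Chars.startswith (List.drop p cs) rl)

theorem mem_hits (cs rl : List Char) (p : Nat) :
    p ∈ hits cs rl ↔ p ≤ cs.length ∧ rl <+: List.drop p cs := by
  simp [hits, List.mem_filter, List.mem_range, PySem.Chars.startswith_iff]

theorem hits_pairwise (cs rl : List Char) : (hits cs rl).Pairwise (· < ·) :=
  List.pairwise_lt_range.sublist List.filter_sublist

-- a prefix occurrence position is at most the length (nonempty needle)
theorem occ_le_length (cs rl : List Char) (hsub : rl ≠ []) (p : Nat) (hp : rl <+: List.drop p cs) :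
    p ≤ cs.length := by
  by_contra hgt
  have hnil : List.drop p cs = [] := List.drop_eq_nil_of_le (by omega)
  rw [hnil] at hp
  exact hsub (List.prefix_nil.mp hp)

theorem head_min {l : List Nat} (h : l.Pairwise (· < ·)) {h0 : Nat} (hh : l.head? = some h0) :
    ∀ p ∈ l, h0 ≤ p := by
  cases l with
  | nil => simp at hh
  | cons a t =>
    simp only [List.head?_cons, Option.some.injEq] at hh
    subst hh
    intro p hp
    rcases List.mem_cons.mp hp with rfl | hp
    · exact le_rfl
    · exact le_of_lt ((List.pairwise_cons.mp h).1 p hp)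

theorem last_max {l : List Nat} (h : l.Pairwise (· < ·)) {l0 : Nat} (hl : l.getLast? = some l0) :
    ∀ p ∈ l, p ≤ l0 := by
  induction l with
  | nil => simp at hl
  | cons a t ih =>
    cases t with
    | nil =>
      simp only [List.getLast?_singleton, Option.some.injEq] at hl
      subst hl
      intro p hp
      rcases List.mem_cons.mp hp with rfl | hp
      · exact le_rfl
      · simp at hp
    | cons b t2 =>
      have hl' : (b :: t2).getLast? = some l0 := by
        simpa [List.getLast?_cons_cons] using hl
      intro p hp
      rcases List.mem_cons.mp hp with rfl | hp
      · exact le_of_lt ((List.pairwise_cons.mp h).1 l0 (List.mem_of_getLast? hl'))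
      · exact ih (List.pairwise_cons.mp h).2 hl' p hp

theorem getLast?_cons_or {α : Type} (p : α) (xs : List α) (o : Option α) :
    ((p :: xs).getLast?).or o = (xs.getLast?).or (some p) := by
  cases xs with
  | nil => simp
  | cons b t =>
    rcases hx : (b :: t).getLast? with _ | x
    · exact absurd (List.getLast?_eq_none_iff.mp hx) (by simp)
    · simp [List.getLast?_cons_cons, hx]

-- characterisation of the occurrence scan
theorem occScan_spec (cs rl : List Char) : ∀ (ps : List Int) (st : Option Int × Option Int),
    altOccScan cs rl ps st =
      (st.1.or ((ps.filter (fun p => PySem.Chars.startswith (List.drop p.toNat cs) rl)).head?.map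
          (fun p => p + rl.length)),
       ((ps.filter (fun p => PySem.Chars.startswith (List.drop p.toNat cs) rl)).getLast?).or st.2) := by
  intro ps
  induction ps with
  | nil => intro st; simp [altOccScan]
  | cons p rest ih =>
    rintro ⟨o1, o2⟩
    by_cases hp : PySem.Chars.startswith (List.drop p.toNat cs) rl
    · rw [altOccScan, if_pos hp, ih]
      cases o1 <;> simp [hp, getLast?_cons_or]
    · rw [altOccScan, if_neg hp, ih]
      simp [hp]

-- the scan over range(len(s)+1) computes first/last occurrence data of the hits list
theorem occ_eq (cs rl : List Char) :
    altOccScan cs rl (PySem.List.pyRange 0 ((cs.length : Int) + 1)) (none, none) =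
      ((hits cs rl).head?.map (fun p : Nat => ((p : Int) + (rl.length : Int))),
       (hits cs rl).getLast?.map (fun p : Nat => ((p : Int)))) := by
  rw [occScan_spec]
  have h1 : ((cs.length : Int) + 1) = ((cs.length + 1 : Nat) : Int) := by push_cast; ring
  rw [h1, PySem.List.pyRange_zero_natCast]
  simp [hits, List.filter_map, Option.map_map, Function.comp_def, Int.toNat_natCast]

-- the prefix-counter dict equals the character count on the prefix
theorem pref_getD (l : List Char) (c : Char) :
    (l.foldl (fun d c => d.insert c (d.getD c 0 + 1)) PySem.Dict.empty).getD c 0 = (l.count c : Int) := by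
  rw [PySem.Dict.foldl_insert_getD_add_one_eq_counter]
  exact PySem.Dict.getD_counter l c

-- absence of rl in the prefix s[:k] read off the first-occurrence data
theorem absent_take_iff (cs rl : List Char) (hsub : rl ≠ []) (k : Nat) :
    (¬ rl <:+: List.take k cs) ↔
      (match (hits cs rl).head? with
       | none => True
       | some h0 => ¬ (h0 + rl.length ≤ k)) := by
  have hchar : rl <:+: List.take k cs ↔ ∃ p, rl <+: List.drop p cs ∧ p + rl.length ≤ k := by
    rw [infix_iff_drop]
    constructor
    · rintro ⟨p, hp⟩
      rw [List.drop_take, List.prefix_take_iff] at hp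
      refine ⟨p, hp.1, ?_⟩
      have h1 : 1 ≤ rl.length := by
        cases rl with
        | nil => exact absurd rfl hsub
        | cons a b => simp
      omega
    · rintro ⟨p, hp, hk⟩
      refine ⟨p, ?_⟩
      rw [List.drop_take, List.prefix_take_iff]
      exact ⟨hp, by omega⟩
  rcases hh : (hits cs rl).head? with _ | h0
  · have hnil : hits cs rl = [] := List.head?_eq_none_iff.mp hh
    constructor
    · intro _; trivial
    · intro _ hin
      rcases hchar.mp hin with ⟨p, hp, hk⟩
      have hmem : p ∈ hits cs rl := (mem_hits cs rl p).mpr ⟨occ_le_length cs rl hsub p hp, hp⟩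
      rw [hnil] at hmem
      simp at hmem
  · rw [hchar]
    constructor
    · intro hne hle
      exact hne ⟨h0, ((mem_hits cs rl h0).mp
        (List.mem_of_mem_head? (by simp [hh]))).2, hle⟩
    · rintro hle ⟨p, hp, hk⟩
      have hmem : p ∈ hits cs rl := (mem_hits cs rl p).mpr ⟨occ_le_length cs rl hsub p hp, hp⟩
      have := head_min (hits_pairwise cs rl) hh p hmem
      omega

-- absence of rl in the suffix s[k+1:] read off the last-occurrence data
theorem absent_drop_iff (cs rl : List Char) (hsub : rl ≠ []) (k : Nat) :
    (¬ rl <:+: List.drop (k + 1) cs) ↔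
      (match (hits cs rl).getLast? with
       | none => True
       | some l0 => l0 < k + 1) := by
  have hchar : rl <:+: List.drop (k + 1) cs ↔ ∃ p, k + 1 ≤ p ∧ rl <+: List.drop p cs := by
    rw [infix_iff_drop]
    constructor
    · rintro ⟨p, hp⟩
      rw [List.drop_drop] at hp
      refine ⟨k + 1 + p, by omega, ?_⟩
      exact hp
    · rintro ⟨p, hk, hp⟩
      obtain ⟨q, rfl⟩ : ∃ q, p = k + 1 + q := ⟨p - (k + 1), by omega⟩
      refine ⟨q, ?_⟩
      rw [List.drop_drop]
      exact hp
  rcases hh : (hits cs rl).getLast? with _ | l0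
  · have hnil : hits cs rl = [] := List.getLast?_eq_none_iff.mp hh
    constructor
    · intro _; trivial
    · intro _ hin
      rcases hchar.mp hin with ⟨p, hk, hp⟩
      have hmem : p ∈ hits cs rl := (mem_hits cs rl p).mpr ⟨occ_le_length cs rl hsub p hp, hp⟩
      rw [hnil] at hmem
      simp at hmem
  · rw [hchar]
    constructor
    · intro hne
      by_contra hge
      exact hne ⟨l0, by omega, ((mem_hits cs rl l0).mp (List.mem_of_getLast? hh)).2⟩
    · rintro hlt ⟨p, hk, hp⟩
      have hmem : p ∈ hits cs rl := (mem_hits cs rl p).mpr ⟨occ_le_length cs rl hsub p hp, hp⟩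
      have := last_max (hits_pairwise cs rl) hh p hmem
      omega

-- collapsing A's nested if with identical else-branches
theorem if_nested (p q : Bool) (X : Bool) :
    (if p then (if q then true else X) else X) = (if p && q then true else X) := by
  cases p <;> cases q <;> simp

-- pulling the two condition/recursion rewrites through the if
theorem if_step (C1 C2 R1 R2 : Bool) (hC : C1 = C2) (hR : R1 = R2) :
    (if C1 then true else R1) = (if C2 then true else R2) := by
  rw [hC, hR]

-- per-index agreement of the two character-count tests
theorem char_cond (cs : List Char) (k : Nat) (hk : k < cs.length) :
    ((PySem.Chars.count (List.take k cs) [cs[k]] == 1) = true ∧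
     (PySem.Chars.count (List.drop (k + 1) cs) [cs[k]] == 1) = true)
    ↔ (((altTotal cs).getD cs[k] 0 == 3) = true ∧
       (((List.take k cs).foldl (fun d c => d.insert c (d.getD c 0 + 1)) (PySem.Dict.empty : PySem.Dict Char Int)).getD cs[k] 0 == 1) = true) := by
  simp only [altTotal]
  rw [count_single, count_single, pref_getD, pref_getD]
  have hsplit : ∀ c : Char, cs[k] = c →
      cs.count c = (List.take k cs).count c + ((List.drop (k + 1) cs).count c + 1) := by
    intro c hc
    have hsd : List.drop k cs = c :: List.drop (k + 1) cs := by
      rw [List.drop_eq_getElem_cons hk, hc]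
    calc cs.count c = (List.take k cs ++ List.drop k cs).count c := by rw [List.take_append_drop]
      _ = (List.take k cs).count c + (List.drop k cs).count c := by rw [List.count_append]
      _ = (List.take k cs).count c + ((List.drop (k + 1) cs).count c + 1) := by
          rw [hsd]; simp
  have hs := hsplit cs[k] rfl
  simp only [beq_iff_eq]
  omega

-- per-index agreement of the r-absence test on the prefix
theorem r_pre_cond (cs rl : List Char) (k : Nat) (hk : k < cs.length) :
    (PySem.Chars.count (List.take k cs) rl == 0) =
      (match (hits cs rl).head?.map (fun p : Nat => ((p : Int) + (rl.length : Int))) with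
       | none => true
       | some e => decide ((k : Int) < e)) := by
  by_cases hrl : rl = []
  · subst hrl
    have hhits : hits cs [] = List.range (cs.length + 1) := by
      simp [hits, PySem.Chars.startswith_iff]
    have hhead : (List.range (cs.length + 1)).head? = some 0 := by
      simp [List.range_succ_eq_map]
    rw [hhits, hhead]
    have hc : (PySem.Chars.count (List.take k cs) [] == 0) = false := by
      simp [count_nil]
    rw [hc]
    simp
  · rcases hh : (hits cs rl).head? with _ | h0
    · have habs := absent_take_iff cs rl hrl k
      rw [hh] at habs
      simp only at habs
      apply Bool.eq_iff_iff.mpr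
      simp [count_eq_zero_iff _ _ hrl]
      exact habs.mpr trivial
    · have habs := absent_take_iff cs rl hrl k
      rw [hh] at habs
      simp only at habs
      apply Bool.eq_iff_iff.mpr
      simp [count_eq_zero_iff _ _ hrl]
      rw [habs]
      omega

-- per-index agreement of the r-absence test on the suffix
theorem r_suf_cond (cs rl : List Char) (k : Nat) (hk : k < cs.length) :
    (PySem.Chars.count (List.drop (k + 1) cs) rl == 0) =
      (match (hits cs rl).getLast?.map (fun p : Nat => ((p : Int))) with
       | none => true
       | some l => decide (l < (k : Int) + 1)) := by
  by_cases hrl : rl = []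
  · subst hrl
    have hhits : hits cs [] = List.range (cs.length + 1) := by
      simp [hits, PySem.Chars.startswith_iff]
    have hlast : (List.range (cs.length + 1)).getLast? = some cs.length := by
      rw [List.range_succ]
      simp
    rw [hhits, hlast]
    have hc : (PySem.Chars.count (List.drop (k + 1) cs) [] == 0) = false := by
      simp [count_nil]
    rw [hc]
    simp
    omega
  · rcases hh : (hits cs rl).getLast? with _ | l0
    · have habs := absent_drop_iff cs rl hrl k
      rw [hh] at habs
      simp only at habs
      apply Bool.eq_iff_iff.mpr
      simp [count_eq_zero_iff _ _ hrl]
      exact habs.mpr trivial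
    · have habs := absent_drop_iff cs rl hrl k
      rw [hh] at habs
      simp only at habs
      apply Bool.eq_iff_iff.mpr
      simp [count_eq_zero_iff _ _ hrl]
      rw [habs]
      omega

-- the two loops agree from any start index, given B's precomputed data
theorem loops_eq (cs rl : List Char) : ∀ (fuel k : Nat), cs.length ≤ k + fuel →
    happyLoopA cs rl (PySem.List.pyRange (k : Int) (cs.length : Int)) =
      altLoop cs rl (altTotal cs)
        ((hits cs rl).head?.map (fun p : Nat => ((p : Int) + (rl.length : Int))))
        ((hits cs rl).getLast?.map (fun p : Nat => ((p : Int))))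
        (PySem.List.pyRange (k : Int) (cs.length : Int))
        ((List.take k cs).foldl (fun d c => d.insert c (d.getD c 0 + 1)) PySem.Dict.empty) := by
  intro fuel
  induction fuel with
  | zero =>
    intro k hk
    rw [PySem.List.pyRange_one_eq_nil (by exact_mod_cast hk)]
    rfl
  | succ f ih =>
    intro k hk
    by_cases hklt : k < cs.length
    case neg =>
      rw [PySem.List.pyRange_one_eq_nil (by exact_mod_cast Nat.le_of_not_lt hklt)]
      rfl
    case pos =>
      rw [PySem.List.pyRange_one_cons (show ((k : Nat) : Int) < ((cs.length : Nat) : Int) by exact_mod_cast hklt)]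
      simp only [happyLoopA, altLoop]
      rw [if_nested]
      have hget : PySem.List.pyGetD cs ((k : Nat) : Int) ' ' = cs[k] := by
        rw [PySem.List.pyGetD_eq_getElem cs ' ' (Int.natCast_nonneg k) (by exact_mod_cast hklt)]
        simp
      have hsl1 : PySem.List.slice cs none (some ((k : Nat) : Int)) = List.take k cs := by
        simpa using PySem.List.slice_to cs (b := ((k : Nat) : Int)) (Int.natCast_nonneg k)
      have hsl2 : PySem.List.slice cs (some (((k : Nat) : Int) + 1)) none = List.drop (k + 1) cs := by
        rw [PySem.List.slice_from cs (a := ((k : Nat) : Int) + 1) (by positivity)]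
        norm_num
      simp only [hget, hsl1, hsl2]
      rw [r_pre_cond cs rl k hklt, r_suf_cond cs rl k hklt]
      have hcast : (((k : Nat) : Int) + 1) = (((k + 1 : Nat) : Nat) : Int) := by push_cast; ring
      rw [hcast]
      have htake : List.take (k + 1) cs = List.take k cs ++ [cs[k]] := by
        rw [List.take_add_one, List.getElem?_eq_getElem hklt]
        rfl
      apply if_step
      · apply Bool.eq_iff_iff.mpr
        simp only [Bool.and_eq_true]
        have hch := char_cond cs k hklt
        tauto
      · rw [ih (k + 1) (by omega), htake, List.foldl_append, List.foldl_cons, List.foldl_nil]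

-- ===== VERDICT (by name: the statement is the Claim_ definition above) =====
theorem happy_possible_spec : Claim_equal_happy_possible := by
  intro s r _
  unfold Spec_happy_possible
  simp only [happy_possible, happy_possible_alt]
  by_cases hlt : (PySem.Set.ofList s.toList).length < 3
  · rw [if_pos hlt, if_pos hlt]
  · rw [if_neg hlt, if_neg hlt]
    rw [occ_eq]
    have hl := loops_eq s.toList r.toList s.toList.length 0 (by omega)
    simpa using hl
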